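-- pv_equiv track=rewrite | github.com/ball-lightning6/neural-sculpting-paradigm | to_be_organized/generate_hanoi_tower_global_strategy_fixed_format.py | state_to_fixed_slots
-- ===== SOURCE A (Python) =====
-- def state_to_fixed_slots(pegs, num_disks, num_stacks):
--     """将盘面状态 [[3,2,1], [], []] 转换为固定槽位的整数列表"""
--     slots = [0] * (num_disks * num_stacks)
--     for i in range(num_stacks):
--         stack = pegs[i]
--         # 从下到上填充槽位
--         for j in range(len(stack)):
--             slot_index = i * num_disks + j
--             disk_id = stack[len(stack) - 1 - j]
--             slots[slot_index] = disk_id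
--     return slots
-- ===== SOURCE B (Python) =====
-- def state_to_fixed_slots(pegs, num_disks, num_stacks):
--     """将盘面状态 [[3,2,1], [], []] 转换为固定槽位的整数列表"""
--     result = []
--     for k in range(num_disks * num_stacks):
--         i, j = divmod(k, num_disks)
--         stack = pegs[i]
--         result.append(stack[len(stack) - 1 - j] if j < len(stack) else 0)
--     return result
-- ===== Notes on version B (the rewrite author's own statement) =====
-- stated objective: alternative
-- what changed: B is a gather: it loops over the output slot indices k in range(num_disks*num_stacks), derives (peg, depth) = divmod(k, num_disks) and reads the value for that slot directly, instead of A's scatter that loops over pegs and writes each disk into a pre-zeroed flat array at i*num_disks+j.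
-- outside the precondition, e.g. on state_to_fixed_slots([[1, 2], [], []], 1, 3): A returns [2, 1, 0], B returns [2, 0, 0]; on state_to_fixed_slots([], -1, -1): A returns [0], B raises IndexError
import Mathlib
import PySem

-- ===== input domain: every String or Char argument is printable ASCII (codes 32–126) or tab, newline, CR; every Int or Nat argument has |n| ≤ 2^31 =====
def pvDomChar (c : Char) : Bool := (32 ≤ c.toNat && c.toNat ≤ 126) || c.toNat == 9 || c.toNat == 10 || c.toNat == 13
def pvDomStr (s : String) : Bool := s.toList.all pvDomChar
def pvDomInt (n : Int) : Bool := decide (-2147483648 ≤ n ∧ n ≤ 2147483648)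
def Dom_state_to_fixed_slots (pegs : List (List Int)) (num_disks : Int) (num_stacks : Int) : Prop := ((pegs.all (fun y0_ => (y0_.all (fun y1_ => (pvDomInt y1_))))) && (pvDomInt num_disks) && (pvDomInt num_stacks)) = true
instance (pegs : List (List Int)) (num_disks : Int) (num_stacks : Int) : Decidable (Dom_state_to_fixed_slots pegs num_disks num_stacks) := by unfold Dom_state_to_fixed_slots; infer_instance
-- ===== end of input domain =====

-- B is a gather over output slot indices (k -> divmod(k, num_disks) -> read the disk)
-- instead of A's scatter writing each peg into a pre-zeroed flat array; objective: alternative.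


-- ===== PORT A =====
-- literal transliteration of Source A; pySetD/pyGetD are exact on the in-range indices Pre_ admits
def state_to_fixed_slots (pegs : List (List Int)) (num_disks : Int) (num_stacks : Int) : List Int :=
  let slots := List.replicate (num_disks * num_stacks).toNat 0
  (PySem.List.pyRange 0 num_stacks 1).foldl (fun slots i =>
    let stack := PySem.List.pyGetD pegs i []
    (List.range stack.length).foldl (fun slots (j : Nat) =>
      let slot_index : Int := i * num_disks + (j : Int)
      let disk_id := stack.getD (stack.length - 1 - j) 0
      PySem.List.pySetD slots slot_index disk_id) slots) slots

-- ===== PORT B =====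
-- literal transliteration of Source B; divmod is exact here: Pre_ only reaches it with num_disks ≠ 0
-- (the range is empty when num_disks = 0), and pyGetD is exact on the in-range indices Pre_ admits
def state_to_fixed_slots_alt (pegs : List (List Int)) (num_disks : Int) (num_stacks : Int) : List Int :=
  (PySem.List.pyRange 0 (num_disks * num_stacks) 1).foldl (fun result k =>
    let i := PySem.Int.floordiv k num_disks
    let j := PySem.Int.mod k num_disks
    let stack := PySem.List.pyGetD pegs i []
    result ++ [if j < (stack.length : Int)
               then PySem.List.pyGetD stack ((stack.length : Int) - 1 - j) 0
               else 0]) []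

-- ===== PRECONDITION & SPEC =====
-- Pre_ restricts to well-formed Hanoi states, the function's natural domain: it excludes
-- num_stacks > len(pegs), where A raises IndexError; overfull pegs (a peg holding more than
-- num_disks disks), on which no fixed-slot encoding is specified, A overwrites neighbouring
-- regions and the two layouts legitimately disagree; and both counts negative, an input no
-- caller forms, on which A returns a positive-length zero array while B raises IndexError.
def Pre_state_to_fixed_slots (pegs : List (List Int)) (num_disks : Int) (num_stacks : Int) : Prop :=
  (num_stacks < 0 ∧ 0 ≤ num_disks) ∨
  (0 ≤ num_stacks ∧ num_stacks ≤ (pegs.length : Int) ∧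
    ∀ s ∈ pegs.take num_stacks.toNat, (s.length : Int) ≤ max num_disks 0)
instance (pegs : List (List Int)) (num_disks : Int) (num_stacks : Int) : Decidable (Pre_state_to_fixed_slots pegs num_disks num_stacks) := by unfold Pre_state_to_fixed_slots; infer_instance

def pvWitness_state_to_fixed_slots : List (List Int) × Int × Int := ([[3,2,1],[],[]], 3, 3)

def Spec_state_to_fixed_slots (pegs : List (List Int)) (num_disks : Int) (num_stacks : Int) (out : List Int) : Prop := out = state_to_fixed_slots_alt pegs num_disks num_stacks
instance (pegs : List (List Int)) (num_disks : Int) (num_stacks : Int) (out : List Int) : Decidable (Spec_state_to_fixed_slots pegs num_disks num_stacks out) := by unfold Spec_state_to_fixed_slots; infer_instance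

-- ===== CLAIM (what is proved, stated in full; the proofs are below) =====
def Claim_equal_state_to_fixed_slots : Prop := ∀ (pegs : List (List Int)) (num_disks : Int) (num_stacks : Int), Dom_state_to_fixed_slots pegs num_disks num_stacks → Pre_state_to_fixed_slots pegs num_disks num_stacks → Spec_state_to_fixed_slots pegs num_disks num_stacks (state_to_fixed_slots pegs num_disks num_stacks)

-- ===== LEMMAS AND PROOFS =====

-- the inner loop of A writes ys = stack.reverse positionally after a prefix P
lemma writeSeq (ys P Q : List Int) (h : ys.length ≤ Q.length) :
    (List.range ys.length).foldl
      (fun slots (j : Nat) => PySem.List.pySetD slots ((P.length : Int) + (j : Int)) (ys.getD j 0))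
      (P ++ Q)
    = P ++ ys ++ Q.drop ys.length := by
  induction ys using List.reverseRecOn with
  | nil => simp
  | append_singleton zs a ih =>
    have hz : zs.length ≤ Q.length := by simp at h; omega
    have hlt : zs.length < Q.length := by simp at h; omega
    rw [List.length_append, List.length_singleton, List.range_succ, List.foldl_append]
    have hcongr :
        (List.range zs.length).foldl
          (fun slots (j : Nat) => PySem.List.pySetD slots ((P.length : Int) + (j : Int)) ((zs ++ [a]).getD j 0))
          (P ++ Q)
        = (List.range zs.length).foldl
          (fun slots (j : Nat) => PySem.List.pySetD slots ((P.length : Int) + (j : Int)) (zs.getD j 0))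
          (P ++ Q) := by
      apply PySem.List.foldl_congr_mem
      intro b x hx
      have hxlt : x < zs.length := List.mem_range.mp hx
      rw [List.getD_append _ _ _ _ hxlt]
    rw [hcongr, ih hz]
    have hget : (zs ++ [a]).getD zs.length 0 = a := by
      simp
    simp only [List.foldl_cons, List.foldl_nil]
    rw [hget]
    -- Q.drop zs.length is nonempty
    obtain ⟨q, R, hQR⟩ : ∃ q R, Q.drop zs.length = q :: R := by
      cases hd : Q.drop zs.length with
      | nil => exfalso; have := List.length_drop (l := Q) (i := zs.length); rw [hd] at this; simp at this; omega
      | cons q R => exact ⟨q, R, rfl⟩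
    have hcast : (P.length : Int) + (zs.length : Int) = ((P.length + zs.length : Nat) : Int) := by push_cast; ring
    rw [hQR, hcast, PySem.List.pySetD_natCast]
    have hset : (P ++ zs ++ q :: R).set (P.length + zs.length) a = P ++ zs ++ a :: R := by
      rw [List.append_assoc, List.set_append_right _ _ (by simp)]
      simp
    rw [hset]
    have hR : R = Q.drop (zs.length + 1) := by
      have := congrArg List.tail hQR
      simpa [List.tail_drop] using this.symm
    simp [hR]

lemma foldl_const (l : List Int) (init : List Int) :
    l.foldl (fun a (_ : Int) => a) init = init := by
  induction l generalizing init with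
  | nil => rfl
  | cons x xs ih => simp only [List.foldl_cons]; exact ih init

-- append a fixed-width column for one stack onto an abstract prefix of zeros
lemma stepWrite (stack Bk : List Int) (r : Nat) (c : Int) (hc : c = (Bk.length : Int))
    (hr : stack.length ≤ r) :
    (List.range stack.length).foldl
      (fun slots (j : Nat) => PySem.List.pySetD slots (c + (j : Int))
        (stack.getD (stack.length - 1 - j) 0))
      (Bk ++ List.replicate r 0)
    = Bk ++ stack.reverse ++ List.replicate (r - stack.length) 0 := by
  have hcongr :
      (List.range stack.length).foldl
        (fun slots (j : Nat) => PySem.List.pySetD slots (c + (j : Int))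
          (stack.getD (stack.length - 1 - j) 0))
        (Bk ++ List.replicate r 0)
      = (List.range stack.reverse.length).foldl
        (fun slots (j : Nat) => PySem.List.pySetD slots ((Bk.length : Int) + (j : Int))
          (stack.reverse.getD j 0))
        (Bk ++ List.replicate r 0) := by
    rw [List.length_reverse]
    apply PySem.List.foldl_congr_mem
    intro acc j hj
    have hjlt : j < stack.length := List.mem_range.mp hj
    have hval : stack.getD (stack.length - 1 - j) 0 = stack.reverse.getD j 0 := by
      rw [List.getD_eq_getElem _ _ (by omega), List.getD_eq_getElem _ _ (by simpa using hjlt)]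
      rw [List.getElem_reverse]
    rw [hc, hval]
  rw [hcongr, writeSeq stack.reverse Bk (List.replicate r 0) (by simpa using hr)]
  simp [List.drop_replicate]

-- A's scatter loops, run on a zero array of size m ≥ k*d, produce the k fixed-width columns
lemma outer (pegs : List (List Int)) (d : Nat) (k : Nat) (hk : k ≤ pegs.length)
    (hlen : ∀ s ∈ pegs.take k, s.length ≤ d) (m : Nat) (hm : k * d ≤ m) :
    ((PySem.List.pyRange 0 (k : Int) 1).foldl (fun slots i =>
      (List.range (PySem.List.pyGetD pegs i []).length).foldl (fun slots (j : Nat) =>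
        PySem.List.pySetD slots (i * (d : Int) + (j : Int))
          ((PySem.List.pyGetD pegs i []).getD ((PySem.List.pyGetD pegs i []).length - 1 - j) 0))
        slots) (List.replicate m 0)
      = ((PySem.List.pyRange 0 (k : Int) 1).foldl (fun result i =>
          result ++ ((PySem.List.pyGetD pegs i []).reverse
            ++ List.replicate ((d : Int) - ((PySem.List.pyGetD pegs i []).length : Int)).toNat 0)) [])
        ++ List.replicate (m - k * d) 0)
    ∧ ((PySem.List.pyRange 0 (k : Int) 1).foldl (fun result i =>
          result ++ ((PySem.List.pyGetD pegs i []).reverse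
            ++ List.replicate ((d : Int) - ((PySem.List.pyGetD pegs i []).length : Int)).toNat 0)) []).length
        = k * d := by
  induction k with
  | zero =>
    constructor
    · simp [PySem.List.pyRange_one_eq_nil]
    · simp [PySem.List.pyRange_one_eq_nil]
  | succ k ih =>
    have hk' : k ≤ pegs.length := by omega
    have hsub : pegs.take k ⊆ pegs.take (k + 1) := by
      intro x hx
      have h1 : (pegs.take (k + 1)).take k = pegs.take k := by
        rw [List.take_take]; congr 1; omega
      rw [← h1] at hx
      exact List.take_subset k (pegs.take (k + 1)) hx
    have hlen' : ∀ s ∈ pegs.take k, s.length ≤ d := fun s hs => hlen s (hsub hs)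
    have hm' : k * d ≤ m := le_trans (Nat.mul_le_mul_right d (Nat.le_succ k)) hm
    obtain ⟨ihA, ihB⟩ := ih hk' hlen' hm'
    have hsplit : PySem.List.pyRange 0 ((k + 1 : Nat) : Int) 1
        = PySem.List.pyRange 0 (k : Int) 1 ++ [(k : Int)] := by
      push_cast
      exact PySem.List.pyRange_one_succ_right (by positivity)
    have hkpl : k < pegs.length := by omega
    have hstack : PySem.List.pyGetD pegs ((k : Nat) : Int) [] = pegs[k] := by
      rw [PySem.List.pyGetD_natCast]
      exact List.getD_eq_getElem pegs [] hkpl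
    have hmem : pegs[k] ∈ pegs.take (k + 1) := by
      have h2 : (pegs.take (k + 1))[k]'(by simp; omega) = pegs[k] := List.getElem_take
      exact h2 ▸ List.getElem_mem _
    have hsd : (pegs[k]).length ≤ d := hlen _ hmem
    have hmd : k * d + d ≤ m := by
      have h3 : (k + 1) * d = k * d + d := by ring
      omega
    have htn : ((d : Int) - ((pegs[k]).length : Int)).toNat = d - (pegs[k]).length := by omega
    obtain ⟨Bk, hBkdef⟩ : ∃ B, ((PySem.List.pyRange 0 (k : Int) 1).foldl (fun result i =>
          result ++ ((PySem.List.pyGetD pegs i []).reverse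
            ++ List.replicate ((d : Int) - ((PySem.List.pyGetD pegs i []).length : Int)).toNat 0)) [])
        = B := ⟨_, rfl⟩
    rw [hBkdef] at ihA ihB
    constructor
    · rw [hsplit, List.foldl_append, List.foldl_append, ihA]
      simp only [List.foldl_cons, List.foldl_nil, hstack, hBkdef]
      rw [stepWrite (pegs[k]) Bk (m - k * d) ((k : Int) * (d : Int))
        (by rw [ihB]; push_cast; ring) (by omega)]
      have harith : m - k * d - (pegs[k]).length
          = (d - (pegs[k]).length) + (m - (k + 1) * d) := by
        have h3 : (k + 1) * d = k * d + d := by ring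
        omega
      rw [harith, List.replicate_add, htn]
      simp [List.append_assoc]
    · rw [hsplit, List.foldl_append]
      simp only [List.foldl_cons, List.foldl_nil, hstack, hBkdef]
      have h3 : (k + 1) * d = k * d + d := by ring
      simp [htn, ihB]
      omega

-- B's append-singleton fold is a map
lemma foldl_push (f : Int → Int) (l : List Int) (init : List Int) :
    l.foldl (fun r k => r ++ [f k]) init = init ++ l.map f := by
  induction l generalizing init with
  | nil => simp
  | cons x xs ih => simp [ih]

-- one gathered column equals the reversed stack padded with zeros
lemma colEq (stack : List Int) (d : Nat) (h : stack.length ≤ d) :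
    (List.range d).map (fun (j : Nat) => if ((j : Nat) : Int) < (stack.length : Int)
        then PySem.List.pyGetD stack ((stack.length : Int) - 1 - ((j : Nat) : Int)) 0
        else 0)
    = stack.reverse ++ List.replicate (d - stack.length) 0 := by
  apply List.ext_getElem
  · simp; omega
  · intro j hj hj'
    simp only [List.getElem_map, List.getElem_range]
    by_cases hjs : j < stack.length
    · rw [if_pos (by exact_mod_cast hjs)]
      have hidx : (stack.length : Int) - 1 - (j : Int) = ((stack.length - 1 - j : Nat) : Int) := by
        omega
      rw [hidx, PySem.List.pyGetD_natCast, List.getD_eq_getElem _ _ (by omega)]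
      rw [List.getElem_append_left (by simpa using hjs), List.getElem_reverse]
    · rw [if_neg (by exact_mod_cast hjs)]
      rw [List.getElem_append_right (by simpa using hjs), List.getElem_replicate]

-- the gather over all slot indices equals the concatenation of the k columns
lemma gatherEq (pegs : List (List Int)) (d : Nat) (k : Nat) (hk : k ≤ pegs.length)
    (hlen : ∀ s ∈ pegs.take k, s.length ≤ d) :
    (PySem.List.pyRange 0 ((d : Int) * (k : Int)) 1).map (fun x =>
      if PySem.Int.mod x (d : Int) < ((PySem.List.pyGetD pegs (PySem.Int.floordiv x (d : Int)) []).length : Int)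
      then PySem.List.pyGetD (PySem.List.pyGetD pegs (PySem.Int.floordiv x (d : Int)) [])
             (((PySem.List.pyGetD pegs (PySem.Int.floordiv x (d : Int)) []).length : Int) - 1
               - PySem.Int.mod x (d : Int)) 0
      else 0)
    = (PySem.List.pyRange 0 (k : Int) 1).foldl (fun result i =>
        result ++ ((PySem.List.pyGetD pegs i []).reverse
          ++ List.replicate ((d : Int) - ((PySem.List.pyGetD pegs i []).length : Int)).toNat 0)) [] := by
  induction k with
  | zero => simp [PySem.List.pyRange_one_eq_nil]
  | succ k ih =>
    have hk' : k ≤ pegs.length := by omega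
    have hsub : pegs.take k ⊆ pegs.take (k + 1) := by
      intro x hx
      have h1 : (pegs.take (k + 1)).take k = pegs.take k := by
        rw [List.take_take]; congr 1; omega
      rw [← h1] at hx
      exact List.take_subset k (pegs.take (k + 1)) hx
    have hlen' : ∀ s ∈ pegs.take k, s.length ≤ d := fun s hs => hlen s (hsub hs)
    have hkpl : k < pegs.length := by omega
    have hstack : PySem.List.pyGetD pegs ((k : Nat) : Int) [] = pegs[k] := by
      rw [PySem.List.pyGetD_natCast]
      exact List.getD_eq_getElem pegs [] hkpl
    have hmem : pegs[k] ∈ pegs.take (k + 1) := by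
      have h2 : (pegs.take (k + 1))[k]'(by simp; omega) = pegs[k] := List.getElem_take
      exact h2 ▸ List.getElem_mem _
    have hsd : (pegs[k]).length ≤ d := hlen _ hmem
    have hsplitR : PySem.List.pyRange 0 ((k + 1 : Nat) : Int) 1
        = PySem.List.pyRange 0 (k : Int) 1 ++ [(k : Int)] := by
      push_cast
      exact PySem.List.pyRange_one_succ_right (by positivity)
    have hsplitL : PySem.List.pyRange 0 ((d : Int) * ((k + 1 : Nat) : Int)) 1
        = PySem.List.pyRange 0 ((d : Int) * (k : Int)) 1
          ++ PySem.List.pyRange ((d : Int) * (k : Int)) ((d : Int) * ((k + 1 : Nat) : Int)) 1 := by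
      apply PySem.List.pyRange_one_append
      · positivity
      · push_cast; nlinarith [Nat.cast_nonneg (α := Int) d]
    rw [hsplitL, List.map_append, ih hk' hlen', hsplitR, List.foldl_append]
    simp only [List.foldl_cons, List.foldl_nil, hstack]
    congr 1
    -- the last block of slot indices gathers exactly column k
    have hrange : PySem.List.pyRange ((d : Int) * (k : Int)) ((d : Int) * ((k + 1 : Nat) : Int)) 1
        = (List.range d).map (fun (t : Nat) => (d : Int) * (k : Int) + (t : Int)) := by
      rw [PySem.List.pyRange_one]
      have hdd : (d : Int) * ((k + 1 : Nat) : Int) - (d : Int) * (k : Int) = (d : Int) := by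
        push_cast; ring
      rw [hdd, Int.toNat_natCast]
    rw [hrange, List.map_map]
    have htn : ((d : Int) - ((pegs[k]).length : Int)).toNat = d - (pegs[k]).length := by omega
    rw [htn, ← colEq (pegs[k]) d hsd]
    apply List.map_congr_left
    intro t ht
    have htd : t < d := List.mem_range.mp ht
    have hd0 : 0 < d := by omega
    have hcast : (d : Int) * (k : Int) + (t : Int) = ((d * k + t : Nat) : Int) := by push_cast; ring
    have hdiv : PySem.Int.floordiv ((d : Int) * (k : Int) + (t : Int)) (d : Int) = (k : Int) := by
      rw [hcast, PySem.Int.floordiv_natCast]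
      congr 1
      rw [Nat.mul_add_div hd0]
      simp [Nat.div_eq_of_lt htd]
    have hmod : PySem.Int.mod ((d : Int) * (k : Int) + (t : Int)) (d : Int) = (t : Int) := by
      rw [hcast, PySem.Int.mod_natCast]
      congr 1
      rw [Nat.mul_add_mod]
      exact Nat.mod_eq_of_lt htd
    simp only [Function.comp, hdiv, hmod, hstack]

-- ===== VERDICT (by name: the statement is the Claim_ definition above) =====
theorem state_to_fixed_slots_spec : Claim_equal_state_to_fixed_slots := by
  intro pegs nd ns _hdom hpre
  unfold Spec_state_to_fixed_slots
  show (PySem.List.pyRange 0 ns 1).foldl (fun slots i =>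
      (List.range (PySem.List.pyGetD pegs i []).length).foldl (fun slots (j : Nat) =>
        PySem.List.pySetD slots (i * nd + (j : Int))
          ((PySem.List.pyGetD pegs i []).getD ((PySem.List.pyGetD pegs i []).length - 1 - j) 0))
        slots) (List.replicate (nd * ns).toNat 0)
    = (PySem.List.pyRange 0 (nd * ns) 1).foldl (fun result k =>
        result ++ [if PySem.Int.mod k nd < ((PySem.List.pyGetD pegs (PySem.Int.floordiv k nd) []).length : Int)
                   then PySem.List.pyGetD (PySem.List.pyGetD pegs (PySem.Int.floordiv k nd) [])
                          (((PySem.List.pyGetD pegs (PySem.Int.floordiv k nd) []).length : Int) - 1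
                            - PySem.Int.mod k nd) 0
                   else 0]) []
  rw [foldl_push]
  simp only [List.nil_append]
  rcases hpre with ⟨hnsneg, hndpos⟩ | ⟨h0, hle, hstk⟩
  · -- num_stacks < 0 with num_disks ≥ 0: both loops are empty, the array has nonpositive size
    have hprod : nd * ns ≤ 0 := mul_nonpos_of_nonneg_of_nonpos hndpos (le_of_lt hnsneg)
    have hnilA : PySem.List.pyRange 0 ns 1 = [] := PySem.List.pyRange_one_eq_nil (le_of_lt hnsneg)
    have hnilB : PySem.List.pyRange 0 (nd * ns) 1 = [] := PySem.List.pyRange_one_eq_nil hprod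
    have hz : (nd * ns).toNat = 0 := by omega
    rw [hnilA, hnilB, hz]
    rfl
  by_cases hnd : 0 ≤ nd
  · -- num_disks ≥ 0: both sides are the concatenation of num_stacks columns of width num_disks
    obtain ⟨d, rfl⟩ : ∃ d : Nat, nd = (d : Int) := ⟨nd.toNat, (Int.toNat_of_nonneg hnd).symm⟩
    obtain ⟨n, rfl⟩ : ∃ n : Nat, ns = (n : Int) := ⟨ns.toNat, (Int.toNat_of_nonneg h0).symm⟩
    have hkle : n ≤ pegs.length := by exact_mod_cast hle
    have hlen : ∀ s ∈ pegs.take n, s.length ≤ d := by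
      intro s hs
      have h1 := hstk s (by simpa using hs)
      have h2 : max (d : Int) 0 = (d : Int) := max_eq_left (by positivity)
      rw [h2] at h1
      exact_mod_cast h1
    have hmt : ((d : Int) * (n : Int)).toNat = d * n := by
      rw [← Nat.cast_mul, Int.toNat_natCast]
    rw [hmt]
    obtain ⟨hA, _⟩ := outer pegs d n hkle hlen (d * n) (Nat.le_of_eq (Nat.mul_comm _ _))
    rw [hA, gatherEq pegs d n hkle hlen]
    have h0' : d * n - n * d = 0 := by rw [Nat.mul_comm]; omega
    rw [h0', List.replicate_zero, List.append_nil]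
  · -- num_disks < 0: Pre_ forces every used peg to be empty, both sides are []
    push Not at hnd
    have hprod : nd * ns ≤ 0 := mul_nonpos_of_nonpos_of_nonneg (le_of_lt hnd) h0
    have hnilB : PySem.List.pyRange 0 (nd * ns) 1 = [] := PySem.List.pyRange_one_eq_nil hprod
    have hz : (nd * ns).toNat = 0 := by omega
    rw [hnilB, hz, List.replicate_zero, List.map_nil]
    have hempty : ∀ i ∈ PySem.List.pyRange 0 ns 1, PySem.List.pyGetD pegs i [] = [] := by
      intro i hi
      obtain ⟨hi0, hins⟩ := (PySem.List.mem_pyRange_one).mp hi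
      have hilt : i.toNat < pegs.length := by omega
      rw [PySem.List.pyGetD_of_nonneg pegs [] hi0, List.getD_eq_getElem pegs [] hilt]
      have hmem : pegs[i.toNat] ∈ pegs.take ns.toNat := by
        have h2 : (pegs.take ns.toNat)[i.toNat]'(by simp; omega) = pegs[i.toNat] :=
          List.getElem_take
        exact h2 ▸ List.getElem_mem _
      have h3 := hstk _ hmem
      have hmax : max nd 0 = 0 := max_eq_right (le_of_lt hnd)
      rw [hmax] at h3
      have h4 : pegs[i.toNat].length = 0 := by omega
      exact List.eq_nil_of_length_eq_zero h4
    refine Eq.trans (PySem.List.foldl_congr_mem _ _ _ _ ?_) (foldl_const _ _)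
    intro acc i hi
    simp [hempty i hi]
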